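-- pv_equiv track=rewrite | github.com/CareerLM-Dev/CareerLM | backend-fastapi/app/services/resource_discovery.py | prioritize_resources_by_learning_style
-- ===== SOURCE A (Python) =====
-- from typing import Optional, Literal
--
-- ResourceType = Literal[
--     "documentation",      # Official reference / tutorial docs
--     "tutorial_video",     # Beginner-friendly video walkthrough
--     "tutorial_article",   # Beginner-friendly written guide
--     "interactive_lab",    # Hands-on coding exercise / lab
--     "coding_challenge",   # Problem to solve (LeetCode, HackerRank, Exercism)
--     "project_based",      # Build-along or project template
--     "cheat_sheet",        # Quick reference / syntax reference
--     "worked_example",     # Real-world code example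
--     "interactive_course", # Codecademy, Scrimba style interactive course
--     "course_video",       # Udemy, Coursera video course
--     "course_article",     # Written course / structured guide
-- ]
--
-- LearningStyle = Literal[
--     "video_tutorials",
--     "hands_on",
--     "reading",
--     "interactive",
--     "mentor",
--     "mixed",
-- ]
--
-- def prioritize_resources_by_learning_style(
--     resources_by_type: dict[ResourceType, list],
--     learning_style: LearningStyle,
--     user_skill_level: str,
-- ) -> list[tuple]:
--     """
--     Sort and prioritize resources based on user's learning style and skill level.
--
--     Returns:
--       Sorted list of (title, url, platform, est_time, difficulty) tuples
--     """
--
--     # Define priority rankings for each learning style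
--     style_priorities = {
--         "video_tutorials": {
--             "tutorial_video": 1,
--             "course_video": 2,
--             "worked_example": 3,
--             "documentation": 4,
--             "interactive_lab": 5,
--         },
--         "hands_on": {
--             "interactive_lab": 1,
--             "coding_challenge": 2,
--             "project_based": 3,
--             "tutorial_video": 4,
--             "documentation": 5,
--         },
--         "reading": {
--             "documentation": 1,
--             "tutorial_article": 2,
--             "cheat_sheet": 3,
--             "course_article": 4,
--             "tutorial_video": 5,
--         },
--         "interactive": {
--             "interactive_course": 1,
--             "interactive_lab": 2,
--             "coding_challenge": 3,
--             "tutorial_video": 4,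
--             "documentation": 5,
--         },
--         "mentor": {
--             "course_video": 1,
--             "tutorial_video": 2,
--             "interactive_course": 3,
--             "worked_example": 4,
--             "documentation": 5,
--         },
--         "mixed": {
--             "documentation": 1,
--             "tutorial_video": 2,
--             "interactive_lab": 3,
--             "coding_challenge": 4,
--             "worked_example": 5,
--         },
--     }
--
--     priorities = style_priorities.get(learning_style, style_priorities["mixed"])
--
--     # Flatten all resources with priority scores
--     flattened = []
--     for rtype, resources in resources_by_type.items():
--         priority = priorities.get(rtype, 10)  # Higher = lower priority
--         for resource in resources:
--             flattened.append((priority, resource))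
--
--     # Sort by priority (lower score = higher priority)
--     flattened.sort(key=lambda x: x[0])
--
--     # Return just the resources (strip priority)
--     return [resource for _, resource in flattened]
-- ===== SOURCE B (Python) =====
-- def _style_order(learning_style):
--     """The same priority tables as ordered tuples: position = priority - 1."""
--     if learning_style == "video_tutorials":
--         return ("tutorial_video", "course_video", "worked_example",
--                 "documentation", "interactive_lab")
--     if learning_style == "hands_on":
--         return ("interactive_lab", "coding_challenge", "project_based",
--                 "tutorial_video", "documentation")
--     if learning_style == "reading":
--         return ("documentation", "tutorial_article", "cheat_sheet",
--                 "course_article", "tutorial_video")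
--     if learning_style == "interactive":
--         return ("interactive_course", "interactive_lab", "coding_challenge",
--                 "tutorial_video", "documentation")
--     if learning_style == "mentor":
--         return ("course_video", "tutorial_video", "interactive_course",
--                 "worked_example", "documentation")
--     # "mixed" and any unknown style
--     return ("documentation", "tutorial_video", "interactive_lab",
--             "coding_challenge", "worked_example")
--
--
-- def prioritize_resources_by_learning_style(
--     resources_by_type,
--     learning_style,
--     user_skill_level,
-- ):
--     """Counting-sort version: the priority of a resource type is its position
--     in the style's ordered tuple (unknown types go last), so each resource
--     list is dropped into one of six buckets and the buckets are concatenated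
--     in order, giving the same stable order as flatten-then-sort."""
--     order = _style_order(learning_style)
--
--     buckets = ([], [], [], [], [], [])
--     for rtype, resources in resources_by_type.items():
--         try:
--             idx = order.index(rtype)
--         except ValueError:
--             idx = 5
--         buckets[idx].extend(resources)
--
--     out = []
--     for b in buckets:
--         out += b
--     return out
-- ===== Notes on version B (the rewrite author's own statement) =====
-- stated objective: alternative
-- what changed: B drops A's dict-of-dicts priority table and flatten-then-stable-sort: each style becomes an ordered 5-tuple of resource types (position = priority), and a single pass distributes each resource list into one of six buckets by tuple position (unknown types go to the last bucket), which are then concatenated - a counting-sort that preserves A's stable tie order.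
import Mathlib
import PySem

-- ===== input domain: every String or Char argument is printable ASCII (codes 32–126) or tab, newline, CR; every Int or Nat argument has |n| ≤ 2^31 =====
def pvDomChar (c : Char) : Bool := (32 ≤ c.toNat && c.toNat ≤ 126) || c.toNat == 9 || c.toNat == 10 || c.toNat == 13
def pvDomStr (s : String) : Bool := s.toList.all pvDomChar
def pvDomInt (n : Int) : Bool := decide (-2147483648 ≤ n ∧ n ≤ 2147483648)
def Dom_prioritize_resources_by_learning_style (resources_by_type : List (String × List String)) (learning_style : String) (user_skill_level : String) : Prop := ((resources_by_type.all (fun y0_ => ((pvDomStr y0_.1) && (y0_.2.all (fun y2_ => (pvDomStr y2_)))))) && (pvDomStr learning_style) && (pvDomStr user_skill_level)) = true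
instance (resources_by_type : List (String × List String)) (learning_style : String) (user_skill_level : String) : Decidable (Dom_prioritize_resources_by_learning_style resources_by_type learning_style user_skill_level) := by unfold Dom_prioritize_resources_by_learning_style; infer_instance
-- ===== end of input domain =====

-- B replaces A's dict-of-dicts priority table and flatten-then-stable-sort by ordered
-- style tuples (position = priority) and a six-bucket counting sort; objective: alternative.

-- ===== PORT A =====
-- the literal style_priorities table of Source A
def pvMixedPriorities : PySem.Dict String Int := PySem.Dict.mk
  [("documentation", 1), ("tutorial_video", 2), ("interactive_lab", 3),
   ("coding_challenge", 4), ("worked_example", 5)]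

def pvStylePriorities : PySem.Dict String (PySem.Dict String Int) := PySem.Dict.mk
  [("video_tutorials", PySem.Dict.mk
      [("tutorial_video", 1), ("course_video", 2), ("worked_example", 3),
       ("documentation", 4), ("interactive_lab", 5)]),
   ("hands_on", PySem.Dict.mk
      [("interactive_lab", 1), ("coding_challenge", 2), ("project_based", 3),
       ("tutorial_video", 4), ("documentation", 5)]),
   ("reading", PySem.Dict.mk
      [("documentation", 1), ("tutorial_article", 2), ("cheat_sheet", 3),
       ("course_article", 4), ("tutorial_video", 5)]),
   ("interactive", PySem.Dict.mk
      [("interactive_course", 1), ("interactive_lab", 2), ("coding_challenge", 3),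
       ("tutorial_video", 4), ("documentation", 5)]),
   ("mentor", PySem.Dict.mk
      [("course_video", 1), ("tutorial_video", 2), ("interactive_course", 3),
       ("worked_example", 4), ("documentation", 5)]),
   ("mixed", pvMixedPriorities)]

def prioritize_resources_by_learning_style (resources_by_type : List (String × List String)) (learning_style : String) (user_skill_level : String) : List String :=
  -- style_priorities.get(learning_style, style_priorities["mixed"]); the key "mixed"
  -- is present in the literal table, so the [] lookup is exactly pvMixedPriorities
  let priorities := pvStylePriorities.getD learning_style pvMixedPriorities
  -- flattened = []; for rtype, resources in …: for resource in resources: flattened.append((priority, resource))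
  let flattened : List (Int × String) :=
    resources_by_type.foldl (fun acc e =>
      e.2.foldl (fun a r => a ++ [(priorities.getD e.1 10, r)]) acc) []
  -- flattened.sort(key=lambda x: x[0])  (stable)
  let sortedL := PySem.List.sorted flattened (fun x => x.1)
  -- [resource for _, resource in flattened]
  sortedL.map (fun x => x.2)

-- ===== PORT B =====
-- Source B's _style_order: each style's priorities as an ordered tuple, position = priority - 1
def pvStyleOrder (learning_style : String) : List String :=
  if learning_style == "video_tutorials" then
    ["tutorial_video", "course_video", "worked_example", "documentation", "interactive_lab"]
  else if learning_style == "hands_on" then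
    ["interactive_lab", "coding_challenge", "project_based", "tutorial_video", "documentation"]
  else if learning_style == "reading" then
    ["documentation", "tutorial_article", "cheat_sheet", "course_article", "tutorial_video"]
  else if learning_style == "interactive" then
    ["interactive_course", "interactive_lab", "coding_challenge", "tutorial_video", "documentation"]
  else if learning_style == "mentor" then
    ["course_video", "tutorial_video", "interactive_course", "worked_example", "documentation"]
  else  -- "mixed" and any unknown style
    ["documentation", "tutorial_video", "interactive_lab", "coding_challenge", "worked_example"]

def prioritize_resources_by_learning_style_alt (resources_by_type : List (String × List String)) (learning_style : String) (user_skill_level : String) : List String :=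
  let order := pvStyleOrder learning_style
  -- buckets = ([], [], [], [], [], []); try: idx = order.index(rtype) except ValueError: idx = 5
  let buckets : List (List String) :=
    resources_by_type.foldl (fun bs e =>
      let idx : Nat := (PySem.List.index? order e.1).getD 5
      bs.set idx ((bs.getD idx []) ++ e.2)) [[], [], [], [], [], []]
  -- out = []; for b in buckets: out += b
  buckets.foldl (fun acc b => acc ++ b) []

-- ===== PRECONDITION & SPEC =====
def Spec_prioritize_resources_by_learning_style (resources_by_type : List (String × List String)) (learning_style : String) (user_skill_level : String) (out : List String) : Prop := out = prioritize_resources_by_learning_style_alt resources_by_type learning_style user_skill_level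
instance (resources_by_type : List (String × List String)) (learning_style : String) (user_skill_level : String) (out : List String) : Decidable (Spec_prioritize_resources_by_learning_style resources_by_type learning_style user_skill_level out) := by unfold Spec_prioritize_resources_by_learning_style; infer_instance

-- ===== CLAIM (what is proved, stated in full; the proofs are below) =====
def Claim_equal_prioritize_resources_by_learning_style : Prop := ∀ (resources_by_type : List (String × List String)) (learning_style : String) (user_skill_level : String), Dom_prioritize_resources_by_learning_style resources_by_type learning_style user_skill_level → Spec_prioritize_resources_by_learning_style resources_by_type learning_style user_skill_level (prioritize_resources_by_learning_style resources_by_type learning_style user_skill_level)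

-- ===== LEMMAS AND PROOFS =====

-- A's priority function and B's bucket-index function
def pvF (ls : String) : String → Int :=
  fun k => (pvStylePriorities.getD ls pvMixedPriorities).getD k 10
def pvG (ls : String) : String → Nat :=
  fun k => (PySem.List.index? (pvStyleOrder ls) k).getD 5
-- the priority a bucket index encodes
def pvIdxP (i : Nat) : Int := if i < 5 then (i : Int) + 1 else 10

-- one priority row against its order tuple, for symbolic key k
theorem pvRow (a b c d e k : String) :
    (PySem.Dict.mk [(a, 1), (b, 2), (c, 3), (d, 4), (e, 5)] : PySem.Dict String Int).getD k 10
      = pvIdxP ((PySem.List.index? [a, b, c, d, e] k).getD 5) := by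
  by_cases ha : a = k
  · subst ha; rw [PySem.List.index?_cons_self]
    simp [PySem.Dict.getD_eq_get?_getD, PySem.Dict.get?_mk_cons, pvIdxP]
  by_cases hb : b = k
  · subst hb
    rw [PySem.List.index?_cons_of_ne _ ha, PySem.List.index?_cons_self]
    simp [PySem.Dict.getD_eq_get?_getD, PySem.Dict.get?_mk_cons, pvIdxP, ha]
  by_cases hc : c = k
  · subst hc
    rw [PySem.List.index?_cons_of_ne _ ha, PySem.List.index?_cons_of_ne _ hb,
      PySem.List.index?_cons_self]
    simp [PySem.Dict.getD_eq_get?_getD, PySem.Dict.get?_mk_cons, pvIdxP, ha, hb]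
  by_cases hd : d = k
  · subst hd
    rw [PySem.List.index?_cons_of_ne _ ha, PySem.List.index?_cons_of_ne _ hb,
      PySem.List.index?_cons_of_ne _ hc, PySem.List.index?_cons_self]
    simp [PySem.Dict.getD_eq_get?_getD, PySem.Dict.get?_mk_cons, pvIdxP, ha, hb, hc]
  by_cases he : e = k
  · subst he
    rw [PySem.List.index?_cons_of_ne _ ha, PySem.List.index?_cons_of_ne _ hb,
      PySem.List.index?_cons_of_ne _ hc, PySem.List.index?_cons_of_ne _ hd,
      PySem.List.index?_cons_self]
    simp [PySem.Dict.getD_eq_get?_getD, PySem.Dict.get?_mk_cons, pvIdxP, ha, hb, hc, hd]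
  · rw [PySem.List.index?_cons_of_ne _ ha, PySem.List.index?_cons_of_ne _ hb,
      PySem.List.index?_cons_of_ne _ hc, PySem.List.index?_cons_of_ne _ hd,
      PySem.List.index?_cons_of_ne _ he]
    simp [PySem.Dict.getD_eq_get?_getD, pvIdxP,
      PySem.List.index?, PySem.Dict.get?, ha, hb, hc, hd, he]

-- A's priority is always the one encoded by B's bucket index
theorem pvFG (ls k : String) : pvF ls k = pvIdxP (pvG ls k) := by
  show (pvStylePriorities.getD ls pvMixedPriorities).getD k 10
      = pvIdxP ((PySem.List.index? (pvStyleOrder ls) k).getD 5)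
  by_cases h1 : ls = "video_tutorials"
  · subst h1; exact pvRow _ _ _ _ _ k
  by_cases h2 : ls = "hands_on"
  · subst h2; exact pvRow _ _ _ _ _ k
  by_cases h3 : ls = "reading"
  · subst h3; exact pvRow _ _ _ _ _ k
  by_cases h4 : ls = "interactive"
  · subst h4; exact pvRow _ _ _ _ _ k
  by_cases h5 : ls = "mentor"
  · subst h5; exact pvRow _ _ _ _ _ k
  by_cases h6 : ls = "mixed"
  · subst h6; exact pvRow _ _ _ _ _ k
  · have hsel : pvStylePriorities.getD ls pvMixedPriorities = pvMixedPriorities := by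
      rw [PySem.Dict.getD_eq_get?_getD]
      simp only [pvStylePriorities, PySem.Dict.get?_mk_cons,
        beq_eq_false_iff_ne.mpr (Ne.symm h1), beq_eq_false_iff_ne.mpr (Ne.symm h2),
        beq_eq_false_iff_ne.mpr (Ne.symm h3), beq_eq_false_iff_ne.mpr (Ne.symm h4),
        beq_eq_false_iff_ne.mpr (Ne.symm h5), beq_eq_false_iff_ne.mpr (Ne.symm h6),
        Bool.false_eq_true, if_false]
      rfl
    have hord : pvStyleOrder ls
        = ["documentation", "tutorial_video", "interactive_lab",
           "coding_challenge", "worked_example"] := by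
      simp only [pvStyleOrder, beq_eq_false_iff_ne.mpr h1, beq_eq_false_iff_ne.mpr h2,
        beq_eq_false_iff_ne.mpr h3, beq_eq_false_iff_ne.mpr h4, beq_eq_false_iff_ne.mpr h5,
        Bool.false_eq_true, if_false]
    rw [hsel, hord]
    exact pvRow _ _ _ _ _ k

-- B's bucket index is at most 5
theorem pvG_le (ls k : String) : pvG ls k ≤ 5 := by
  show (PySem.List.index? (pvStyleOrder ls) k).getD 5 ≤ 5
  cases h : PySem.List.index? (pvStyleOrder ls) k with
  | none => simp
  | some i =>
      rcases (PySem.List.index?_eq_some_iff _ _ _).mp h with ⟨pre, suf, heq, hlen, -⟩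
      have : (pvStyleOrder ls).length = 5 := by
        unfold pvStyleOrder; split_ifs <;> rfl
      rw [heq] at this
      simp only [Option.getD_some]
      simp at this
      omega

-- pvIdxP is injective on bucket indices 0..5
theorem pvIdxP_inj {a b : Nat} (ha : a ≤ 5) (hb : b ≤ 5) (h : pvIdxP a = pvIdxP b) : a = b := by
  unfold pvIdxP at h; split_ifs at h <;> omega

-- the per-priority bucket A's sort produces
def pvBucket (f : String → Int) (p : Int) (l : List (String × List String)) : List String :=
  (l.filter (fun e => f e.1 == p)).flatMap (fun e => e.2)

-- the per-index bucket B's loop produces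
def pvBucketN (g : String → Nat) (i : Nat) (l : List (String × List String)) : List String :=
  (l.filter (fun e => g e.1 == i)).flatMap (fun e => e.2)

theorem pvBucket_eq (ls : String) (i : Nat) (hi : i ≤ 5) (l : List (String × List String)) :
    pvBucket (pvF ls) (pvIdxP i) l = pvBucketN (pvG ls) i l := by
  unfold pvBucket pvBucketN
  congr 1
  apply List.filter_congr
  intro e _
  rw [pvFG]
  by_cases h : pvG ls e.1 = i
  · simp [h]
  · have : pvIdxP (pvG ls e.1) ≠ pvIdxP i :=
      fun hc => h (pvIdxP_inj (pvG_le ls e.1) hi hc)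
    simp [h, this]

theorem pvBucket_cons (f : String → Int) (p : Int) (e : String × List String)
    (l : List (String × List String)) :
    pvBucket f p (e :: l) = (if f e.1 = p then e.2 else []) ++ pvBucket f p l := by
  by_cases h : f e.1 = p <;> simp [pvBucket, h]

theorem pvBucketN_cons (g : String → Nat) (i : Nat) (e : String × List String)
    (l : List (String × List String)) :
    pvBucketN g i (e :: l) = (if g e.1 = i then e.2 else []) ++ pvBucketN g i l := by
  by_cases h : g e.1 = i <;> simp [pvBucketN, h]

-- the priorities A can produce are 1..5 and 10
theorem pvPriority_mem (ls k : String) :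
    pvF ls k ∈ ([1, 2, 3, 4, 5, 10] : List Int) := by
  rw [pvFG]
  have := pvG_le ls k
  interval_cases h : pvG ls k <;> simp [pvIdxP]

theorem pvInsertBy_append {α : Type} (before : α → α → Bool) (x : α) (L R : List α)
    (h : ∀ y ∈ L, before x y = false) :
    PySem.List.insertBy before x (L ++ R) = L ++ PySem.List.insertBy before x R := by
  induction L with
  | nil => simp
  | cons y L ih =>
      simp only [List.cons_append, PySem.List.insertBy, h y (List.mem_cons_self ..),
        Bool.false_eq_true, if_false, List.cons.injEq, true_and]
      exact ih fun z hz => h z (List.mem_cons_of_mem _ hz)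

theorem pvInsertBy_front {α : Type} (before : α → α → Bool) (x : α) (R : List α)
    (h : ∀ y ∈ R, before x y = true) :
    PySem.List.insertBy before x R = x :: R := by
  cases R with
  | nil => rfl
  | cons y R => simp [PySem.List.insertBy, h y (List.mem_cons_self ..)]

-- inserting one element into the bucket concatenation lands at the end of its own bucket
theorem pvBucketInsert {α : Type} (key : α → Int) (x : α) (ks : List Int)
    (hks : ks.Pairwise (· < ·)) (hx : key x ∈ ks) (L : List α) :
    PySem.List.insertBy (fun a b => decide (key a < key b)) x
      (ks.flatMap (fun p => L.filter (fun y => key y == p))) =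
    ks.flatMap (fun p => (L ++ [x]).filter (fun y => key y == p)) := by
  induction ks with
  | nil => cases hx
  | cons k ks ih =>
      rcases List.pairwise_cons.mp hks with ⟨hk, hks'⟩
      simp only [List.flatMap_cons]
      by_cases hxk : key x = k
      · rw [pvInsertBy_append _ _ _ _ (fun y hy => ?_), pvInsertBy_front _ _ _ (fun y hy => ?_)]
        · have htail : ∀ p ∈ ks, (L ++ [x]).filter (fun y => key y == p)
              = L.filter (fun y => key y == p) := by
            intro p hp
            have hne : key x ≠ p := by have := hk p hp; omega
            simp [List.filter_append, hne]
          rw [List.flatMap_congr htail, List.filter_append]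
          simp [hxk]
        · rcases List.mem_flatMap.mp hy with ⟨p, hp, hyp⟩
          have hyk : key y = p := by simpa using (List.mem_filter.mp hyp).2
          have := hk p hp
          simp only [decide_eq_true_iff]; omega
        · have hyk : key y = k := by simpa using (List.mem_filter.mp hy).2
          simp only [decide_eq_false_iff_not]; omega
      · have hxks : key x ∈ ks := by
          rcases List.mem_cons.mp hx with h | h
          · exact absurd h hxk
          · exact h
        have hkx : k < key x := hk _ hxks
        rw [pvInsertBy_append _ _ _ _ (fun y hy => ?_), ih hks' hxks]
        · have : (L ++ [x]).filter (fun y => key y == k) = L.filter (fun y => key y == k) := by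
            simp [List.filter_append, hxk]
          rw [this]
        · have hyk : key y = k := by simpa using (List.mem_filter.mp hy).2
          simp only [decide_eq_false_iff_not]; omega

-- a stable sort whose keys all lie in a strictly increasing list is the bucket concatenation
theorem pvSortedBuckets {α : Type} (key : α → Int) (ks : List Int)
    (hks : ks.Pairwise (· < ·)) (L : List α) (hL : ∀ y ∈ L, key y ∈ ks) :
    PySem.List.sorted L key = ks.flatMap (fun p => L.filter (fun y => key y == p)) := by
  induction L using List.reverseRecOn with
  | nil => simp [PySem.List.sorted_eq_foldl_insertBy]
  | append_singleton L x ih =>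
      rw [PySem.List.sorted_eq_foldl_insertBy, List.foldl_append]
      simp only [List.foldl_cons, List.foldl_nil]
      rw [← PySem.List.sorted_eq_foldl_insertBy,
        ih (fun y hy => hL y (List.mem_append_left _ hy))]
      exact pvBucketInsert key x ks hks (hL x (by simp)) L

-- A's flattened pair list, filtered by one priority and stripped, is the bucket
theorem pvFilterMap (f : String → Int) (p : Int) (l : List (String × List String)) :
    ((l.flatMap (fun e => e.2.map (fun r => (f e.1, r)))).filter
        (fun y => y.1 == p)).map (fun x => x.2) = pvBucket f p l := by
  induction l with
  | nil => simp [pvBucket]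
  | cons e l ih =>
      simp only [List.flatMap_cons, List.filter_append, List.map_append, ih, pvBucket_cons]
      by_cases h : f e.1 = p
      · simp [h, List.filter_map, Function.comp_def]
      · simp [h, List.filter_map, Function.comp_def]

-- B's bucket loop, named so the invariant can be stated and reused
def pvBStep (g : String → Nat) (bs : List (List String)) (e : String × List String) :
    List (List String) :=
  let idx : Nat := g e.1
  bs.set idx ((bs.getD idx []) ++ e.2)

-- B's bucket-loop invariant
theorem pvBLoop (g : String → Nat) (hg : ∀ k, g k ≤ 5)
    (l : List (String × List String)) :
    ∀ c1 c2 c3 c4 c5 c6 : List String,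
    l.foldl (pvBStep g) [c1, c2, c3, c4, c5, c6] =
      [c1 ++ pvBucketN g 0 l, c2 ++ pvBucketN g 1 l, c3 ++ pvBucketN g 2 l,
       c4 ++ pvBucketN g 3 l, c5 ++ pvBucketN g 4 l, c6 ++ pvBucketN g 5 l] := by
  induction l with
  | nil => intro c1 c2 c3 c4 c5 c6; simp [pvBucketN]
  | cons e l ih =>
      intro c1 c2 c3 c4 c5 c6
      have he := hg e.1
      interval_cases h : g e.1
      · rw [List.foldl_cons,
            show pvBStep g [c1, c2, c3, c4, c5, c6] e = [c1 ++ e.2, c2, c3, c4, c5, c6] from by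
              simp [pvBStep, h, List.getD], ih]
        simp [pvBucketN_cons, h, List.append_assoc]
      · rw [List.foldl_cons,
            show pvBStep g [c1, c2, c3, c4, c5, c6] e = [c1, c2 ++ e.2, c3, c4, c5, c6] from by
              simp [pvBStep, h, List.getD], ih]
        simp [pvBucketN_cons, h, List.append_assoc]
      · rw [List.foldl_cons,
            show pvBStep g [c1, c2, c3, c4, c5, c6] e = [c1, c2, c3 ++ e.2, c4, c5, c6] from by
              simp [pvBStep, h, List.getD], ih]
        simp [pvBucketN_cons, h, List.append_assoc]
      · rw [List.foldl_cons,
            show pvBStep g [c1, c2, c3, c4, c5, c6] e = [c1, c2, c3, c4 ++ e.2, c5, c6] from by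
              simp [pvBStep, h, List.getD], ih]
        simp [pvBucketN_cons, h, List.append_assoc]
      · rw [List.foldl_cons,
            show pvBStep g [c1, c2, c3, c4, c5, c6] e = [c1, c2, c3, c4, c5 ++ e.2, c6] from by
              simp [pvBStep, h, List.getD], ih]
        simp [pvBucketN_cons, h, List.append_assoc]
      · rw [List.foldl_cons,
            show pvBStep g [c1, c2, c3, c4, c5, c6] e = [c1, c2, c3, c4, c5, c6 ++ e.2] from by
              simp [pvBStep, h, List.getD], ih]
        simp [pvBucketN_cons, h, List.append_assoc]

-- each port equals the six-bucket concatenation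
theorem pvA_eq (rt : List (String × List String)) (ls usl : String) :
    prioritize_resources_by_learning_style rt ls usl =
      pvBucketN (pvG ls) 0 rt ++ (pvBucketN (pvG ls) 1 rt ++ (pvBucketN (pvG ls) 2 rt ++
      (pvBucketN (pvG ls) 3 rt ++ (pvBucketN (pvG ls) 4 rt ++ pvBucketN (pvG ls) 5 rt)))) := by
  show (PySem.List.sorted
      (rt.foldl (fun acc e => e.2.foldl (fun a r => a ++ [(pvF ls e.1, r)]) acc) [])
      (fun x => x.1)).map (fun x => x.2) = _
  have hflat : rt.foldl (fun acc e => e.2.foldl (fun a r => a ++ [(pvF ls e.1, r)]) acc) []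
      = rt.flatMap (fun e => e.2.map (fun r => (pvF ls e.1, r))) := by
    have h1 : (fun (acc : List (Int × String)) (e : String × List String) =>
          e.2.foldl (fun a r => a ++ [(pvF ls e.1, r)]) acc)
        = fun acc e => acc ++ e.2.map (fun r => (pvF ls e.1, r)) := by
      funext acc e
      exact PySem.List.foldl_append_singleton_eq_map _ _ _
    rw [h1, PySem.List.foldl_append_eq_flatMap, List.nil_append]
  rw [hflat]
  have hkeys : ∀ y ∈ rt.flatMap (fun e => e.2.map (fun r => (pvF ls e.1, r))),
      (fun x : Int × String => x.1) y ∈ ([1, 2, 3, 4, 5, 10] : List Int) := by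
    intro y hy
    rcases List.mem_flatMap.mp hy with ⟨e, _, hye⟩
    rcases List.mem_map.mp hye with ⟨r, _, hr⟩
    subst hr
    exact pvPriority_mem ls e.1
  rw [pvSortedBuckets (fun x : Int × String => x.1) [1, 2, 3, 4, 5, 10] (by decide) _ hkeys]
  simp only [List.flatMap_cons, List.flatMap_nil, List.append_nil, List.map_append]
  rw [pvFilterMap, pvFilterMap, pvFilterMap, pvFilterMap, pvFilterMap, pvFilterMap]
  rw [show (1 : Int) = pvIdxP 0 from rfl, show (2 : Int) = pvIdxP 1 from rfl,
    show (3 : Int) = pvIdxP 2 from rfl, show (4 : Int) = pvIdxP 3 from rfl,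
    show (5 : Int) = pvIdxP 4 from rfl, show (10 : Int) = pvIdxP 5 from rfl]
  rw [pvBucket_eq ls 0 (by omega), pvBucket_eq ls 1 (by omega), pvBucket_eq ls 2 (by omega),
    pvBucket_eq ls 3 (by omega), pvBucket_eq ls 4 (by omega), pvBucket_eq ls 5 (by omega)]

theorem pvAlt_eq (rt : List (String × List String)) (ls usl : String) :
    prioritize_resources_by_learning_style_alt rt ls usl =
      pvBucketN (pvG ls) 0 rt ++ (pvBucketN (pvG ls) 1 rt ++ (pvBucketN (pvG ls) 2 rt ++
      (pvBucketN (pvG ls) 3 rt ++ (pvBucketN (pvG ls) 4 rt ++ pvBucketN (pvG ls) 5 rt)))) := by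
  show List.foldl (fun acc b => acc ++ b) []
      (rt.foldl (pvBStep (pvG ls)) [[], [], [], [], [], []]) = _
  rw [pvBLoop (pvG ls) (fun k => pvG_le ls k) rt [] [] [] [] [] []]
  simp [List.append_assoc]

-- ===== VERDICT (by name: the statement is the Claim_ definition above) =====
theorem prioritize_resources_by_learning_style_spec : Claim_equal_prioritize_resources_by_learning_style := by
  intro rt ls usl _hdom
  show prioritize_resources_by_learning_style rt ls usl
      = prioritize_resources_by_learning_style_alt rt ls usl
  rw [pvA_eq rt ls usl, pvAlt_eq rt ls usl]
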